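-- pv_equiv track=rewrite | github.com/wantingwang-27/DSS5105_Automating_ESG_Insights | api/model_api.py | generate_esg_summary
-- ===== SOURCE A (Python) =====
-- def generate_esg_summary(text):
--     environmental_keywords = ["carbon", "climate", "sustainability", "renewable", "emissions", "energy"]
--     social_keywords = ["diversity", "labor", "human rights", "community", "employee", "welfare"]
--     governance_keywords = ["board", "transparency", "audit", "corruption", "ethics", "compliance"]
--
--     sections = {"Environmental": [], "Social": [], "Governance": []}
--
--     for line in text.split("\n"):
--         l = line.lower()
--         if any(k in l for k in environmental_keywords):
--             sections["Environmental"].append(line.strip())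
--         if any(k in l for k in social_keywords):
--             sections["Social"].append(line.strip())
--         if any(k in l for k in governance_keywords):
--             sections["Governance"].append(line.strip())
--
--     def clean(lines): return " ".join(lines[:3]) if lines else "No mention found."
--
--     return {
--         "Environmental": clean(sections["Environmental"]),
--         "Social": clean(sections["Social"]),
--         "Governance": clean(sections["Governance"])
--     }
-- ===== SOURCE B (Python) =====
-- ENV_KEYWORDS = ["carbon", "climate", "sustainability", "renewable", "emissions", "energy"]
-- SOC_KEYWORDS = ["diversity", "labor", "human rights", "community", "employee", "welfare"]
-- GOV_KEYWORDS = ["board", "transparency", "audit", "corruption", "ethics", "compliance"]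
--
--
-- def _advance(state, keywords, line, low):
--     # Online update: keep only (match count, running summary), never a list of matches.
--     cnt, summary = state
--     if cnt < 3 and any(k in low for k in keywords):
--         stripped = line.strip()
--         return (cnt + 1, stripped if cnt == 0 else summary + " " + stripped)
--     return state
--
--
-- def _finish(state):
--     cnt, summary = state
--     return summary if cnt else "No mention found."
--
--
-- def generate_esg_summary(text):
--     env = soc = gov = (0, "")
--     for line in text.split("\n"):
--         if env[0] == 3 and soc[0] == 3 and gov[0] == 3:
--             break  # all summaries are complete; the rest of the text cannot change them
--         low = line.lower()
--         env = _advance(env, ENV_KEYWORDS, line, low)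
--         soc = _advance(soc, SOC_KEYWORDS, line, low)
--         gov = _advance(gov, GOV_KEYWORDS, line, low)
--     return {"Environmental": _finish(env), "Social": _finish(soc), "Governance": _finish(gov)}
-- ===== Notes on version B (the rewrite author's own statement) =====
-- stated objective: alternative
-- what changed: A collects every matching line into three dict-held lists, then truncates with [:3] and joins at the end; B is an online/streaming algorithm that keeps only a bounded state per category (a match counter capped at 3 and the summary string built incrementally), never materialises match lists or slices, and stops scanning the text early once all three summaries are complete.
import Mathlib
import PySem

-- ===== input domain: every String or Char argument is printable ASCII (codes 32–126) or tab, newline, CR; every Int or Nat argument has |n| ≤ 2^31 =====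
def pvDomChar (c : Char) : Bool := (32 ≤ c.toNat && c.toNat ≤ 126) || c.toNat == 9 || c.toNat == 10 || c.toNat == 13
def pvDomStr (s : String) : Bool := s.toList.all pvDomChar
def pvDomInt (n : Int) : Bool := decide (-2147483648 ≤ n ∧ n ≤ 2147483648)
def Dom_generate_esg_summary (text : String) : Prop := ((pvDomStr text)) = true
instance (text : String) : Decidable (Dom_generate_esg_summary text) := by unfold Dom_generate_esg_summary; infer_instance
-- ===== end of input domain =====

-- B replaces A's collect-all-then-truncate-and-join passes by an online single pass keeping only a
-- bounded (counter, running summary) state per category, with early exit once all three are full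
-- (objective: alternative streaming algorithm with O(1) extra space; return value identical).

-- ===== PORT A =====
-- A's per-line loop over the dict `sections`, transliterated as a foldl with Dict.modify appends.
def pvStepA (envK socK govK : List String)
    (sec : PySem.Dict String (List String)) (line : String) :
    PySem.Dict String (List String) :=
  let l := PySem.Str.lower line
  let sec := if envK.any (fun k => PySem.Str.isIn k l) then
      sec.modify "Environmental" [] (fun xs => xs ++ [PySem.Str.strip line]) else sec
  let sec := if socK.any (fun k => PySem.Str.isIn k l) then
      sec.modify "Social" [] (fun xs => xs ++ [PySem.Str.strip line]) else sec
  if govK.any (fun k => PySem.Str.isIn k l) then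
      sec.modify "Governance" [] (fun xs => xs ++ [PySem.Str.strip line]) else sec

def pvCleanA (lines : List String) : String :=
  if lines ≠ [] then PySem.Str.join " " (lines.take 3) else "No mention found."

def generate_esg_summary (text : String) : List (String × String) :=
  let environmental_keywords := ["carbon", "climate", "sustainability", "renewable", "emissions", "energy"]
  let social_keywords := ["diversity", "labor", "human rights", "community", "employee", "welfare"]
  let governance_keywords := ["board", "transparency", "audit", "corruption", "ethics", "compliance"]
  let sections : PySem.Dict String (List String) :=
    PySem.Dict.ofList [("Environmental", []), ("Social", []), ("Governance", [])]
  let sections := ((PySem.Str.split? text "\n").getD []).foldl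
    (pvStepA environmental_keywords social_keywords governance_keywords) sections
  [("Environmental", pvCleanA (sections.getD "Environmental" [])),
   ("Social", pvCleanA (sections.getD "Social" [])),
   ("Governance", pvCleanA (sections.getD "Governance" []))]

-- ===== PORT B =====
-- Source B's module-level keyword constants.
def pvEnvK : List String := ["carbon", "climate", "sustainability", "renewable", "emissions", "energy"]
def pvSocK : List String := ["diversity", "labor", "human rights", "community", "employee", "welfare"]
def pvGovK : List String := ["board", "transparency", "audit", "corruption", "ethics", "compliance"]

-- Source B's `_advance`: bounded online update of one category's (count, summary) state.
def pvAdvance (state : Nat × String) (keywords : List String) (line low : String) : Nat × String :=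
  if state.1 < 3 ∧ keywords.any (fun k => PySem.Str.isIn k low) then
    let stripped := PySem.Str.strip line
    (state.1 + 1, if state.1 == 0 then stripped else state.2 ++ " " ++ stripped)
  else state

-- Source B's `_finish`.
def pvFinish (state : Nat × String) : String :=
  if state.1 == 0 then "No mention found." else state.2

-- Source B's for-loop with its early `break` once all three summaries are complete.
def pvLoopB : List String → (Nat × String) → (Nat × String) → (Nat × String) →
    ((Nat × String) × (Nat × String) × (Nat × String))
  | [], env, soc, gov => (env, soc, gov)
  | line :: rest, env, soc, gov =>
    if env.1 == 3 && soc.1 == 3 && gov.1 == 3 then (env, soc, gov)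
    else
      let low := PySem.Str.lower line
      pvLoopB rest (pvAdvance env pvEnvK line low) (pvAdvance soc pvSocK line low)
        (pvAdvance gov pvGovK line low)

def generate_esg_summary_alt (text : String) : List (String × String) :=
  let r := pvLoopB ((PySem.Str.split? text "\n").getD []) (0, "") (0, "") (0, "")
  [("Environmental", pvFinish r.1), ("Social", pvFinish r.2.1), ("Governance", pvFinish r.2.2)]

-- ===== PRECONDITION & SPEC =====
def Spec_generate_esg_summary (text : String) (out : List (String × String)) : Prop := out = generate_esg_summary_alt text
instance (text : String) (out : List (String × String)) : Decidable (Spec_generate_esg_summary text out) := by unfold Spec_generate_esg_summary; infer_instance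

-- ===== CLAIM (what is proved, stated in full; the proofs are below) =====
def Claim_equal_generate_esg_summary : Prop := ∀ (text : String), Dom_generate_esg_summary text → Spec_generate_esg_summary text (generate_esg_summary text)

-- ===== LEMMAS AND PROOFS =====

def pvMatch (ks : List String) (line : String) : Bool :=
  ks.any (fun k => PySem.Str.isIn k (PySem.Str.lower line))

def pvHits (ks : List String) (lines : List String) : List String :=
  (lines.filter (pvMatch ks)).map PySem.Str.strip

-- the bounded state B's loop maintains, as a function of the matches seen so far
def pvStOf (hs : List String) : Nat × String :=
  (min 3 hs.length, PySem.Str.join " " (hs.take 3))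

-- the uncurried step of B's loop body, ignoring the early exit
def pvStepB (t : (Nat × String) × (Nat × String) × (Nat × String)) (line : String) :
    (Nat × String) × (Nat × String) × (Nat × String) :=
  let low := PySem.Str.lower line
  (pvAdvance t.1 pvEnvK line low, pvAdvance t.2.1 pvSocK line low, pvAdvance t.2.2 pvGovK line low)

theorem pvStr_eq_of_toList {s t : String} (h : s.toList = t.toList) : s = t := by
  have := congrArg String.ofList h; simpa using this

theorem pvJoin_singleton (a : String) : PySem.Str.join " " [a] = a := by
  simp [PySem.Str.join]

theorem pvJoin_cons_cons (a b : String) (r : List String) :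
    PySem.Str.join " " (a :: b :: r) = a ++ " " ++ PySem.Str.join " " (b :: r) := by
  apply pvStr_eq_of_toList
  simp [PySem.Str.join, PySem.Chars.join_cons_cons]

theorem pvJoin_snoc (xs : List String) (x : String) (h : xs ≠ []) :
    PySem.Str.join " " (xs ++ [x]) = PySem.Str.join " " xs ++ " " ++ x := by
  induction xs with
  | nil => exact absurd rfl h
  | cons a rest ih =>
    cases rest with
    | nil => rw [List.cons_append, List.nil_append, pvJoin_cons_cons, pvJoin_singleton, pvJoin_singleton]
    | cons b r =>
      have hih := ih (by simp)
      simp only [List.cons_append] at hih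
      rw [List.cons_append, List.cons_append, pvJoin_cons_cons, hih, pvJoin_cons_cons a b r]
      simp only [String.append_assoc]

-- B's `_advance` is exactly "append the stripped line to the abstract match list (if it matches)".
theorem pvAdvance_stOf (ks : List String) (line : String) (hs : List String) :
    pvAdvance (pvStOf hs) ks line (PySem.Str.lower line)
      = pvStOf (hs ++ if pvMatch ks line then [PySem.Str.strip line] else []) := by
  by_cases m : pvMatch ks line = true
  · rw [if_pos m]
    by_cases hlen : hs.length < 3
    · have hmin : min 3 hs.length = hs.length := by omega
      rw [pvAdvance, if_pos]
      · simp only [pvStOf, hmin, List.length_append, List.length_singleton]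
        refine Prod.ext (by simp; omega) ?_
        have htake : (hs ++ [PySem.Str.strip line]).take 3 = hs ++ [PySem.Str.strip line] := by
          apply List.take_of_length_le; simp; omega
        rw [htake]
        by_cases h0 : hs = []
        · subst h0; simp [pvJoin_singleton]
        · have : (hs.length == 0) = false := by
            simp only [beq_eq_false_iff_ne]; intro hc; exact h0 (List.length_eq_zero_iff.mp hc)
          simp only [this]
          rw [if_neg (by simp), pvJoin_snoc hs _ h0, List.take_of_length_le (by omega)]
      · exact ⟨by simpa [pvStOf] using hmin ▸ hlen, by simpa [pvMatch] using m⟩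
    · have hmin : min 3 hs.length = 3 := by omega
      rw [pvAdvance, if_neg (by simp [pvStOf, hmin])]
      simp only [pvStOf, hmin, List.length_append, List.length_singleton]
      refine Prod.ext (by simp; omega) ?_
      rw [List.take_append_of_le_length (by omega)]
  · rw [if_neg m, List.append_nil, pvAdvance,
      if_neg (fun hc => m (by simpa [pvMatch] using hc.2))]

-- the per-category fold computes the bounded state of all matches
theorem pvFold_cat (ks : List String) (lines : List String) (hs : List String) :
    lines.foldl (fun st line => pvAdvance st ks line (PySem.Str.lower line)) (pvStOf hs)
      = pvStOf (hs ++ pvHits ks lines) := by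
  induction lines generalizing hs with
  | nil => simp [pvHits]
  | cons line rest ih =>
    rw [List.foldl_cons, pvAdvance_stOf, ih]
    have : pvHits ks (line :: rest)
        = (if pvMatch ks line then [PySem.Str.strip line] else []) ++ pvHits ks rest := by
      simp only [pvHits, List.filter_cons]
      split_ifs with h <;> simp
    rw [this, List.append_assoc]

-- the early exit is sound: once all three counters are 3 the step is the identity
theorem pvStepB_full (t : (Nat × String) × (Nat × String) × (Nat × String)) (line : String)
    (h1 : t.1.1 = 3) (h2 : t.2.1.1 = 3) (h3 : t.2.2.1 = 3) : pvStepB t line = t := by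
  obtain ⟨⟨c1, s1⟩, ⟨c2, s2⟩, c3, s3⟩ := t
  simp only at h1 h2 h3; subst h1 h2 h3
  simp [pvStepB, pvAdvance]

theorem pvFoldl_stepB_full (lines : List String)
    (t : (Nat × String) × (Nat × String) × (Nat × String))
    (h1 : t.1.1 = 3) (h2 : t.2.1.1 = 3) (h3 : t.2.2.1 = 3) :
    lines.foldl pvStepB t = t := by
  induction lines with
  | nil => rfl
  | cons line rest ih => rw [List.foldl_cons, pvStepB_full t line h1 h2 h3, ih]

theorem pvLoopB_eq_foldl (lines : List String) (e s g : Nat × String) :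
    pvLoopB lines e s g = lines.foldl pvStepB (e, s, g) := by
  induction lines generalizing e s g with
  | nil => rfl
  | cons line rest ih =>
    rw [pvLoopB, List.foldl_cons]
    by_cases h : (e.1 == 3 && s.1 == 3 && g.1 == 3) = true
    · simp only [h, if_true]
      have h' := h
      simp only [Bool.and_eq_true, beq_iff_eq] at h'
      obtain ⟨⟨h1, h2⟩, h3⟩ := h'
      rw [pvStepB_full (e, s, g) line h1 h2 h3, pvFoldl_stepB_full rest (e, s, g) h1 h2 h3]
    · rw [if_neg h, ih]
      rfl

-- the triple fold acts componentwise
theorem pvFoldl_stepB_components (lines : List String) (e s g : Nat × String) :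
    lines.foldl pvStepB (e, s, g)
      = (lines.foldl (fun st line => pvAdvance st pvEnvK line (PySem.Str.lower line)) e,
         lines.foldl (fun st line => pvAdvance st pvSocK line (PySem.Str.lower line)) s,
         lines.foldl (fun st line => pvAdvance st pvGovK line (PySem.Str.lower line)) g) := by
  induction lines generalizing e s g with
  | nil => rfl
  | cons line rest ih => rw [List.foldl_cons, List.foldl_cons, List.foldl_cons, List.foldl_cons]; exact ih _ _ _

theorem pvFinish_stOf (hs : List String) : pvFinish (pvStOf hs) = pvCleanA hs := by
  cases hs with
  | nil => rfl
  | cons a rest => simp [pvFinish, pvStOf, pvCleanA]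

-- B's loop result, per category, equals A's "clean of all matches"
theorem pvLoopB_cat (lines : List String) :
    pvFinish (pvLoopB lines (0, "") (0, "") (0, "")).1 = pvCleanA (pvHits pvEnvK lines) ∧
    pvFinish (pvLoopB lines (0, "") (0, "") (0, "")).2.1 = pvCleanA (pvHits pvSocK lines) ∧
    pvFinish (pvLoopB lines (0, "") (0, "") (0, "")).2.2 = pvCleanA (pvHits pvGovK lines) := by
  have h0 : (0, "") = pvStOf [] := by simp [pvStOf]; rfl
  rw [pvLoopB_eq_foldl, pvFoldl_stepB_components, h0, pvFold_cat, pvFold_cat, pvFold_cat]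
  simp [pvFinish_stOf]

-- A's fold grows each key's list by exactly the stripped matching lines of that key's keywords.
theorem pvFoldA_getD (envK socK govK : List String) (lines : List String)
    (d : PySem.Dict String (List String)) (key : String) (ks : List String)
    (hkey : (key = "Environmental" ∧ ks = envK) ∨ (key = "Social" ∧ ks = socK) ∨
            (key = "Governance" ∧ ks = govK)) :
    (lines.foldl (pvStepA envK socK govK) d).getD key []
      = d.getD key [] ++
        (lines.filter (fun line =>
            ks.any (fun k => PySem.Str.isIn k (PySem.Str.lower line)))).map PySem.Str.strip := by
  induction lines generalizing d with
  | nil => simp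
  | cons line rest ih =>
    rw [List.foldl_cons, ih, List.filter_cons]
    have hstep : (pvStepA envK socK govK d line).getD key []
        = d.getD key [] ++
          (if ks.any (fun k => PySem.Str.isIn k (PySem.Str.lower line)) = true
           then [PySem.Str.strip line] else []) := by
      simp only [pvStepA]
      rcases hkey with ⟨h, hks⟩ | ⟨h, hks⟩ | ⟨h, hks⟩ <;> subst h <;> rw [hks] <;>
        by_cases h1 : envK.any (fun k => PySem.Str.isIn k (PySem.Str.lower line)) = true <;>
        by_cases h2 : socK.any (fun k => PySem.Str.isIn k (PySem.Str.lower line)) = true <;>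
        by_cases h3 : govK.any (fun k => PySem.Str.isIn k (PySem.Str.lower line)) = true <;>
        simp only [h1, h2, h3, ite_true] <;>
        simp [PySem.Dict.getD_modify]
    rw [hstep]
    split_ifs with h <;> simp [List.map_cons]

-- ===== VERDICT =====
theorem generate_esg_summary_spec : Claim_equal_generate_esg_summary := by
  intro text _
  show generate_esg_summary text = generate_esg_summary_alt text
  simp only [generate_esg_summary, generate_esg_summary_alt]
  obtain ⟨hE, hS, hG⟩ := pvLoopB_cat ((PySem.Str.split? text "\n").getD [])
  rw [hE, hS, hG,
      pvFoldA_getD _ _ _ _ _ "Environmental" _ (Or.inl ⟨rfl, rfl⟩),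
      pvFoldA_getD _ _ _ _ _ "Social" _ (Or.inr (Or.inl ⟨rfl, rfl⟩)),
      pvFoldA_getD _ _ _ _ _ "Governance" _ (Or.inr (Or.inr ⟨rfl, rfl⟩))]
  rfl
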